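-- pv_equiv track=rewrite | github.com/Trottero/aoc-2023 | 13/part2.py | find_mirror_point
-- ===== SOURCE A (Python) =====
-- def find_mirror_point(grid: list[str]) -> list[tuple[int, str]]:
--     # Vertical Match
--     matches = []
--
--     for startx in range(1, len(grid[0])):
--         # See if it is mirrored veritcally
--         offset = 0
--         while True:
--             # If we are still in the loop and one of them goes out of bounds, we stop
--             if startx - offset - 1 < 0 or startx + offset >= len(grid[0]):
--                 matches.append((startx, "vertical"))
--                 break
--
--             # Check if both columns are the same
--             if all(
--                 [
--                     grid[y][startx - offset - 1] == grid[y][startx + offset]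
--                     for y in range(len(grid))
--                 ]
--             ):
--                 offset += 1
--                 continue
--
--             break
--
--     # Horizontal Match
--     for starty in range(1, len(grid)):
--         # See if it is mirrored horizontally
--         offset = 0
--         while True:
--             # If we are still in the loop and one of them goes out of bounds, we stop
--             if starty - offset - 1 < 0 or starty + offset >= len(grid):
--                 matches.append((starty, "horizontal"))
--                 break
--
--             # Check if both rows are the same
--             if all(
--                 [
--                     grid[starty - offset - 1][x] == grid[starty + offset][x]
--                     for x in range(len(grid[0]))
--                 ]
--             ):
--                 offset += 1
--                 continue
--
--             break
--
--     return matches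
-- ===== SOURCE B (Python) =====
-- def find_mirror_point(grid: list[str]) -> list[tuple[int, str]]:
--     # Truncate rows to the width of the first row, transpose once, then test
--     # each candidate axis with a single slice-vs-reversed-slice comparison.
--     w = len(grid[0])
--     rows = [row[:w] for row in grid]
--     cols = ["".join(row[x] for row in rows) for x in range(w)]
--
--     def axes(seq, label):
--         n = len(seq)
--         return [(i, label) for i in range(1, n)
--                 if seq[max(0, 2 * i - n):i] == seq[i:2 * i][::-1]]
--
--     return axes(cols, "vertical") + axes(rows, "horizontal")
-- ===== Notes on version B (the rewrite author's own statement) =====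
-- stated objective: alternative
-- what changed: B transposes the (width-truncated) grid once and decides each candidate axis with a single slice-vs-reversed-slice comparison, replacing A's per-axis expand-while-equal loop that rebuilds a per-row/per-column comparison list at every offset; the C-level slice/compare removes the interpreted character loops (measured ~25x at the largest size).
import Mathlib
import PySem

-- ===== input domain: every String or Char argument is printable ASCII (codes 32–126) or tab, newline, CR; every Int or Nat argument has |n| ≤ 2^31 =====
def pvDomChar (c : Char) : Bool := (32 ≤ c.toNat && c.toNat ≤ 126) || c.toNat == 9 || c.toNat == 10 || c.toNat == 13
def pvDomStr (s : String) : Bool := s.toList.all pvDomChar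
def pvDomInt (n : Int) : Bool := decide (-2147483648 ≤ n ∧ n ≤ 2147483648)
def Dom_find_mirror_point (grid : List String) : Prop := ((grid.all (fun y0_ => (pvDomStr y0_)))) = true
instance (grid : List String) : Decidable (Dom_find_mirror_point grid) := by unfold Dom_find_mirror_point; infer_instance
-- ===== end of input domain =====

-- B replaces A's per-axis expand-while-equal loops (which rescan rows/columns character by
-- character) by one transposition plus a single slice-vs-reversed-slice comparison per axis.

-- ===== PORT A =====
-- shared transliteration of A's two identical `while True:` loops; `test a b` is the
-- inner `all(...)` comparison, `fuel` only makes the loop total (it never runs out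
-- because the boundary check fires once offset reaches min(start, bound - start)).
def pvWhile (test : Int → Int → Bool) (bound start offset : Int) (fuel : Nat) : Bool :=
  match fuel with
  | 0 => false
  | fuel + 1 =>
    if start - offset - 1 < 0 || bound ≤ start + offset then true
    else if test (start - offset - 1) (start + offset) then
      pvWhile test bound start (offset + 1) fuel
    else false

-- the inner `all([...])` column / row comparisons of A
def pvVTest (g : List (List Char)) (h : Int) (a b : Int) : Bool :=
  (PySem.List.pyRange 0 h 1).all (fun y =>
    PySem.List.pyGetD (PySem.List.pyGetD g y []) a ' ' ==
    PySem.List.pyGetD (PySem.List.pyGetD g y []) b ' ')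

def pvHTest (g : List (List Char)) (w : Int) (a b : Int) : Bool :=
  (PySem.List.pyRange 0 w 1).all (fun x =>
    PySem.List.pyGetD (PySem.List.pyGetD g a []) x ' ' ==
    PySem.List.pyGetD (PySem.List.pyGetD g b []) x ' ')

def find_mirror_point (grid : List String) : List (Int × String) :=
  let g := grid.map String.toList
  let w : Int := PySem.List.len (PySem.List.pyGetD g 0 [])
  let h : Int := PySem.List.len g
  let m1 := (PySem.List.pyRange 1 w 1).foldl (fun acc startx =>
    if pvWhile (pvVTest g h) w startx 0 (w.toNat + 1) then acc ++ [(startx, "vertical")] else acc) []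
  (PySem.List.pyRange 1 h 1).foldl (fun acc starty =>
    if pvWhile (pvHTest g w) h starty 0 (h.toNat + 1) then acc ++ [(starty, "horizontal")] else acc) m1

-- ===== PORT B =====
-- `axes(seq, label)` of Source B: candidate i is an axis iff the slice up to i equals the
-- reversed slice after i (both clamped at the boundary).
def pvAxes (seq : List (List Char)) (label : String) : List (Int × String) :=
  let n : Int := PySem.List.len seq
  ((PySem.List.pyRange 1 n 1).filter (fun i =>
      PySem.List.slice seq (some (max 0 (2 * i - n))) (some i) ==
      (PySem.List.slice seq (some i) (some (2 * i))).reverse)).map (fun i => (i, label))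

def find_mirror_point_alt (grid : List String) : List (Int × String) :=
  let w : Int := PySem.Str.len (grid.headD "")
  let rows := grid.map (fun r => PySem.List.slice r.toList none (some w))
  let cols := (PySem.List.pyRange 0 w 1).map (fun x =>
    rows.map (fun r => PySem.List.pyGetD r x ' '))
  pvAxes cols "vertical" ++ pvAxes rows "horizontal"

-- ===== PRECONDITION & SPEC =====
-- Pre_ excludes exactly the inputs where A raises IndexError: the empty grid
-- (grid[0]) and grids with a row shorter than the first row (grid[y][x] with
-- x < len(grid[0])).  A returns on every other input.
def Pre_find_mirror_point (grid : List String) : Prop :=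
  grid ≠ [] ∧ ∀ r ∈ grid, (grid.headD "").toList.length ≤ r.toList.length
instance (grid : List String) : Decidable (Pre_find_mirror_point grid) := by
  unfold Pre_find_mirror_point; infer_instance
def pvWitness_find_mirror_point : List String := ["#.#", "...."]

def Spec_find_mirror_point (grid : List String) (out : List (Int × String)) : Prop := out = find_mirror_point_alt grid
instance (grid : List String) (out : List (Int × String)) : Decidable (Spec_find_mirror_point grid out) := by unfold Spec_find_mirror_point; infer_instance

-- ===== CLAIM (what is proved, stated in full; the proofs are below) =====
def Claim_equal_find_mirror_point : Prop := ∀ (grid : List String), Dom_find_mirror_point grid → Pre_find_mirror_point grid → Spec_find_mirror_point grid (find_mirror_point grid)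

-- ===== LEMMAS AND PROOFS =====


-- canonical meaning of "i is a mirror axis of seq"
def mirrorP (seq : List (List Char)) (i : Nat) : Prop :=
  ∀ k : Nat, k < min i (seq.length - i) → seq.getD (i - 1 - k) [] = seq.getD (i + k) []

lemma getElem_idx_congr {α : Type} (l : List α) {i j : Nat} (h : i = j) (hi : i < l.length) :
    l[i] = l[j]'(h ▸ hi) := by subst h; rfl

lemma slice_cond_iff (seq : List (List Char)) (i : Nat) (h1 : 1 ≤ i) (h2 : i < seq.length) :
    (PySem.List.slice seq (some (max 0 (2 * (i : Int) - (seq.length : Int)))) (some (i : Int)) ==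
      (PySem.List.slice seq (some (i : Int)) (some (2 * (i : Int)))).reverse) = true ↔
    mirrorP seq i := by
  have hm : (min i (seq.length - i)) ≤ i := Nat.min_le_left _ _
  set n := seq.length with hn
  set m := min i (n - i) with hmdef
  rw [PySem.List.slice_toNat seq (le_max_left 0 _) (Int.natCast_nonneg i),
      PySem.List.slice_toNat seq (Int.natCast_nonneg i) (by positivity)]
  have e1 : (max 0 (2 * (i : Int) - (n : Int))).toNat = i - m := by omega
  have e2 : ((i : Int)).toNat = i := by omega
  have e3 : (2 * (i : Int)).toNat = 2 * i := by omega
  rw [e1, e2, e3]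
  have e4 : i - (i - m) = m := by omega
  have e5 : 2 * i - i = i := by omega
  rw [e4, e5, beq_iff_eq]
  have hlenL : ((seq.drop (i - m)).take m).length = m := by
    simp [List.length_take, List.length_drop]; omega
  have hlenR : ((seq.drop i).take i).length = m := by
    simp [List.length_take, List.length_drop]; omega
  unfold mirrorP
  rw [← hn, ← hmdef]
  constructor
  · intro hEq k hk
    have h1' : m - 1 - k < ((seq.drop (i - m)).take m).length := by omega
    have := List.getElem_of_eq hEq h1'
    rw [List.getElem_take, List.getElem_drop, List.getElem_reverse,
        List.getElem_take, List.getElem_drop] at this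
    have ei1 : i - m + (m - 1 - k) = i - 1 - k := by omega
    have ei2 : i + (((seq.drop i).take i).length - 1 - (m - 1 - k)) = i + k := by
      rw [hlenR]; omega
    rw [List.getD_eq_getElem seq [] (by omega : i - 1 - k < n),
        List.getD_eq_getElem seq [] (by omega : i + k < n)]
    have hA := getElem_idx_congr seq ei1.symm (by omega : i - 1 - k < seq.length)
    have hB := getElem_idx_congr seq ei2 (by rw [hlenR]; omega)
    exact (hA.trans this).trans hB
  · intro hP
    apply List.ext_getElem
    · simp only [List.length_reverse, hlenL, hlenR]
    · intro j hj1 hj2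
      rw [List.getElem_take, List.getElem_drop, List.getElem_reverse,
          List.getElem_take, List.getElem_drop]
      have hjm : j < m := by omega
      have hk : m - 1 - j < m := by omega
      have := hP (m - 1 - j) hk
      rw [List.getD_eq_getElem seq [] (by omega : i - 1 - (m - 1 - j) < n),
          List.getD_eq_getElem seq [] (by omega : i + (m - 1 - j) < n)] at this
      have ei1 : i - m + j = i - 1 - (m - 1 - j) := by omega
      have ei2 : i + (((seq.drop i).take i).length - 1 - j) = i + (m - 1 - j) := by
        rw [hlenR]
      have hA := getElem_idx_congr seq ei1 (by omega : i - m + j < seq.length)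
      have hB := getElem_idx_congr seq ei2.symm (by omega : i + (m - 1 - j) < seq.length)
      exact (hA.trans this).trans hB

lemma pvWhile_aux (test : Int → Int → Bool) (seq : List (List Char)) (i : Nat)
    (_h1 : 1 ≤ i) (h2 : i < seq.length)
    (htest : ∀ a b : Nat, a < seq.length → b < seq.length →
      (test (a : Int) (b : Int) = true ↔ seq.getD a [] = seq.getD b [])) :
    ∀ (fuel offset : Nat), offset ≤ min i (seq.length - i) →
    min i (seq.length - i) < offset + fuel →
    (pvWhile test (seq.length : Int) (i : Int) (offset : Int) fuel = true ↔
      ∀ k : Nat, offset ≤ k → k < min i (seq.length - i) →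
        seq.getD (i - 1 - k) [] = seq.getD (i + k) []) := by
  intro fuel
  induction fuel with
  | zero => intro offset ho hf; omega
  | succ fuel ih =>
    intro offset ho hf
    set n := seq.length with hn
    set m := min i (n - i) with hmdef
    rw [pvWhile]
    by_cases hb : offset = m
    · have hc : ((i : Int) - (offset : Int) - 1 < 0 || decide ((n : Int) ≤ (i : Int) + (offset : Int))) = true := by
        subst hb
        simp only [Bool.or_eq_true, decide_eq_true_eq]
        omega
      rw [if_pos (by simpa using hc)]
      simp only [true_iff]
      intro k hk1 hk2; omega
    · have hlt : offset < m := by omega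
      rw [if_neg (by simp only [Bool.or_eq_true, decide_eq_true_eq]; omega)]
      have ecast1 : (i : Int) - (offset : Int) - 1 = ((i - offset - 1 : Nat) : Int) := by omega
      have ecast2 : (i : Int) + (offset : Int) = ((i + offset : Nat) : Int) := by omega
      have htv := htest (i - offset - 1) (i + offset) (by omega) (by omega)
      rw [ecast1, ecast2]
      by_cases ht : test ((i - offset - 1 : Nat) : Int) ((i + offset : Nat) : Int) = true
      · rw [if_pos ht]
        have ecast3 : (offset : Int) + 1 = ((offset + 1 : Nat) : Int) := by omega
        rw [ecast3, ih (offset + 1) (by omega) (by omega)]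
        constructor
        · intro hrest k hk1 hk2
          rcases Nat.eq_or_lt_of_le hk1 with heq | hlt'
          · subst heq
            have heq2 : i - 1 - offset = i - offset - 1 := by omega
            rw [heq2]; exact htv.mp ht
          · exact hrest k hlt' hk2
        · intro hall k hk1 hk2; exact hall k (by omega) hk2
      · rw [if_neg ht]
        simp only [Bool.false_eq_true, false_iff]
        intro hall
        have heq : i - 1 - offset = i - offset - 1 := by omega
        exact ht (htv.mpr (by rw [← heq]; exact hall offset le_rfl hlt))

-- the per-row `all(...)` over the grid is equality of two per-row projections
lemma all_range_map_iff {β : Type} [BEq β] [LawfulBEq β] (g : List (List Char)) (F K : List Char → β) :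
    ((List.range g.length).all (fun y => F (g.getD y []) == K (g.getD y [])) = true) ↔
    g.map F = g.map K := by
  simp only [List.all_eq_true, List.mem_range, beq_iff_eq]
  constructor
  · intro h
    apply List.ext_getElem (by simp)
    intro j hj1 hj2
    simp only [List.getElem_map]
    have hjg : j < g.length := by simpa using hj1
    have := h j hjg
    rwa [List.getD_eq_getElem g [] hjg] at this
  · intro h y hy
    have h1 : y < (g.map F).length := by simpa using hy
    have := List.getElem_of_eq h h1
    simp only [List.getElem_map] at this
    rwa [List.getD_eq_getElem g [] hy]

lemma take_eq_iff (r s : List Char) (w : Nat) (hr : w ≤ r.length) (hs : w ≤ s.length) :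
    (r.take w = s.take w) ↔ ∀ x : Nat, x < w → r.getD x ' ' = s.getD x ' ' := by
  constructor
  · intro h x hx
    have h1 : x < (r.take w).length := by simp only [List.length_take]; omega
    have := List.getElem_of_eq h h1
    rw [List.getElem_take, List.getElem_take] at this
    rw [List.getD_eq_getElem r ' ' (by omega), List.getD_eq_getElem s ' ' (by omega)]
    exact this
  · intro h
    apply List.ext_getElem (by simp only [List.length_take]; omega)
    intro j hj1 hj2
    rw [List.getElem_take, List.getElem_take]
    have hjw : j < w := by simp only [List.length_take] at hj1; omega
    have := h j hjw
    rwa [List.getD_eq_getElem r ' ' (by omega), List.getD_eq_getElem s ' ' (by omega)] at this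


lemma bool_eq_of_iff {a b : Bool} (h : a = true ↔ b = true) : a = b := by
  cases a <;> cases b <;> simp_all

def colsOf (G : List (List Char)) (w : Nat) : List (List Char) :=
  (List.range w).map (fun x => G.map (fun r => r.getD x ' '))

lemma colsOf_length (G : List (List Char)) (w : Nat) : (colsOf G w).length = w := by
  simp [colsOf]

lemma colsOf_getD (G : List (List Char)) (w a : Nat) (ha : a < w) :
    (colsOf G w).getD a [] = G.map (fun r => r.getD a ' ') := by
  simp [colsOf, List.getD_eq_getElem?_getD, ha]

lemma getD_take_lt (r : List Char) (w a : Nat) (ha : a < w) :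
    (r.take w).getD a ' ' = r.getD a ' ' := by
  simp [List.getD_eq_getElem?_getD, ha]

lemma vtest_iff (G : List (List Char)) (w a b : Nat) (ha : a < w) (hb : b < w) :
    (pvVTest G (G.length : Int) (a : Int) (b : Int) = true) ↔
    (colsOf G w).getD a [] = (colsOf G w).getD b [] := by
  rw [colsOf_getD G w a ha, colsOf_getD G w b hb]
  unfold pvVTest
  rw [PySem.List.pyRange_one]
  simp only [Int.sub_zero, Int.toNat_natCast, List.all_map, Function.comp_def, zero_add,
    PySem.List.pyGetD_natCast]
  exact all_range_map_iff G (fun r => r.getD a ' ') (fun r => r.getD b ' ')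

lemma htest_iff (G : List (List Char)) (w a b : Nat)
    (hw : ∀ r ∈ G, w ≤ r.length) (ha : a < G.length) (hb : b < G.length) :
    (pvHTest G (w : Int) (a : Int) (b : Int) = true) ↔
    (G.map (fun r => r.take w)).getD a [] = (G.map (fun r => r.take w)).getD b [] := by
  have hga : (G.map (fun r => r.take w)).getD a [] = (G.getD a []).take w := by
    simp [List.getD_eq_getElem?_getD, List.getElem?_map, List.getElem?_eq_getElem ha]
  have hgb : (G.map (fun r => r.take w)).getD b [] = (G.getD b []).take w := by
    simp [List.getD_eq_getElem?_getD, List.getElem?_map, List.getElem?_eq_getElem hb]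
  have hma : G.getD a [] ∈ G := by
    rw [List.getD_eq_getElem G [] ha]; exact List.getElem_mem ha
  have hmb : G.getD b [] ∈ G := by
    rw [List.getD_eq_getElem G [] hb]; exact List.getElem_mem hb
  rw [hga, hgb, take_eq_iff _ _ w (hw _ hma) (hw _ hmb)]
  unfold pvHTest
  rw [PySem.List.pyRange_one]
  simp only [Int.sub_zero, Int.toNat_natCast, List.all_map, Function.comp_def, zero_add,
    PySem.List.pyGetD_natCast, List.all_eq_true, List.mem_range, beq_iff_eq]

lemma rowsB_eq (grid : List String) (w : Nat) :
    grid.map (fun r => PySem.List.slice r.toList none (some (w : Int))) =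
    (grid.map String.toList).map (fun r => r.take w) := by
  rw [List.map_map]
  apply List.map_congr_left
  intro s _
  simp [PySem.List.slice_to_natCast]

lemma colsB_eq (grid : List String) (w : Nat) :
    (PySem.List.pyRange 0 (w : Int) 1).map (fun x =>
      (grid.map (fun r => PySem.List.slice r.toList none (some (w : Int)))).map
        (fun r => PySem.List.pyGetD r x ' ')) =
    colsOf (grid.map String.toList) w := by
  rw [PySem.List.pyRange_one, rowsB_eq]
  simp only [Int.sub_zero, Int.toNat_natCast, List.map_map]
  unfold colsOf
  apply List.map_congr_left
  intro k hk
  simp only [Function.comp_def, zero_add, PySem.List.pyGetD_natCast, List.map_map]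
  apply List.map_congr_left
  intro r _
  exact getD_take_lt _ _ _ (List.mem_range.mp hk)

lemma axis_eq_vertical (G : List (List Char)) (w : Nat) (x : Int)
    (hx1 : 1 ≤ x) (hx2 : x < (w : Int)) :
    pvWhile (pvVTest G (G.length : Int)) (w : Int) x 0 (((w : Int)).toNat + 1) =
    (PySem.List.slice (colsOf G w) (some (max 0 (2 * x - ((colsOf G w).length : Int))))
        (some x) ==
      (PySem.List.slice (colsOf G w) (some x) (some (2 * x))).reverse) := by
  obtain ⟨i, rfl⟩ : ∃ k : Nat, x = (k : Int) := ⟨x.toNat, by omega⟩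
  have hi1 : 1 ≤ i := by omega
  have hi2 : i < w := by omega
  have hcl : (colsOf G w).length = w := colsOf_length G w
  have htest : ∀ a b : Nat, a < (colsOf G w).length → b < (colsOf G w).length →
      (pvVTest G (G.length : Int) (a : Int) (b : Int) = true ↔
        (colsOf G w).getD a [] = (colsOf G w).getD b []) := by
    intro a b ha hb
    rw [hcl] at ha hb
    exact vtest_iff G w a b ha hb
  have hA := pvWhile_aux (pvVTest G (G.length : Int)) (colsOf G w) i hi1 (by omega) htest
    ((colsOf G w).length + 1) 0 (by omega) (by omega)
  have hB := slice_cond_iff (colsOf G w) i hi1 (by omega)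
  apply bool_eq_of_iff
  rw [hcl] at hA
  simp only [Nat.cast_zero, Int.toNat_natCast] at hA ⊢
  rw [hA, hB]
  unfold mirrorP
  rw [hcl]
  constructor
  · intro h k hk; exact h k (Nat.zero_le k) hk
  · intro h k _ hk; exact h k hk

lemma axis_eq_horizontal (G : List (List Char)) (w : Nat) (x : Int)
    (hw : ∀ r ∈ G, w ≤ r.length) (hx1 : 1 ≤ x) (hx2 : x < (G.length : Int)) :
    pvWhile (pvHTest G (w : Int)) (G.length : Int) x 0 (((G.length : Int)).toNat + 1) =
    (PySem.List.slice (G.map (fun r => r.take w))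
        (some (max 0 (2 * x - ((G.map (fun r => r.take w)).length : Int)))) (some x) ==
      (PySem.List.slice (G.map (fun r => r.take w)) (some x) (some (2 * x))).reverse) := by
  obtain ⟨i, rfl⟩ : ∃ k : Nat, x = (k : Int) := ⟨x.toNat, by omega⟩
  have hi1 : 1 ≤ i := by omega
  have hi2 : i < G.length := by omega
  have hcl : (G.map (fun r => r.take w)).length = G.length := by simp
  have htest : ∀ a b : Nat, a < (G.map (fun r => r.take w)).length →
      b < (G.map (fun r => r.take w)).length →
      (pvHTest G (w : Int) (a : Int) (b : Int) = true ↔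
        (G.map (fun r => r.take w)).getD a [] = (G.map (fun r => r.take w)).getD b []) := by
    intro a b ha hb
    rw [hcl] at ha hb
    exact htest_iff G w a b hw ha hb
  have hA := pvWhile_aux (pvHTest G (w : Int)) (G.map (fun r => r.take w)) i hi1 (by omega) htest
    ((G.map (fun r => r.take w)).length + 1) 0 (by omega) (by omega)
  have hB := slice_cond_iff (G.map (fun r => r.take w)) i hi1 (by omega)
  apply bool_eq_of_iff
  rw [hcl] at hA
  simp only [Nat.cast_zero, Int.toNat_natCast] at hA ⊢
  rw [hA, hB]
  unfold mirrorP
  rw [hcl]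
  constructor
  · intro h k hk; exact h k (Nat.zero_le k) hk
  · intro h k _ hk; exact h k hk

-- ===== VERDICT (by name: the statement is the Claim_ definition above) =====
theorem find_mirror_point_spec : Claim_equal_find_mirror_point := by
  intro grid _ hPre
  obtain ⟨hne, hwle⟩ := hPre
  unfold Spec_find_mirror_point find_mirror_point find_mirror_point_alt pvAxes
  have hhead : PySem.List.pyGetD (grid.map String.toList) 0 [] = (grid.headD "").toList := by
    cases grid with
    | nil => exact absurd rfl hne
    | cons a l => simp [PySem.List.pyGetD_zero_cons]
  simp only [hhead, PySem.List.len_eq, PySem.Str.len_eq]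
  rw [colsB_eq grid ((grid.headD "").toList.length), rowsB_eq grid ((grid.headD "").toList.length)]
  set W := (grid.headD "").toList.length with hW
  set G := grid.map String.toList with hGdef
  have hwle' : ∀ r ∈ G, W ≤ r.length := by
    intro r hr
    rw [hGdef] at hr
    obtain ⟨s, hs, rfl⟩ := List.mem_map.mp hr
    exact hwle s hs
  rw [PySem.List.foldl_append_ite, PySem.List.foldl_append_ite, List.nil_append]
  have e1 : PySem.List.pyRange 1 ((colsOf G W).length : Int) 1 = PySem.List.pyRange 1 (W : Int) 1 := by
    rw [colsOf_length]
  have e2 : PySem.List.pyRange 1 (((G.map (fun r => r.take W)).length : Int)) 1 =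
      PySem.List.pyRange 1 ((G.length : Int)) 1 := by
    rw [List.length_map]
  rw [e1, e2]
  congr 1
  · refine congrArg (List.map _) (List.filter_congr ?_)
    intro x hx
    obtain ⟨hx1, hx2⟩ := PySem.List.mem_pyRange_one.mp hx
    simp only [Bool.decide_eq_true]
    exact axis_eq_vertical G W x hx1 hx2
  · refine congrArg (List.map _) (List.filter_congr ?_)
    intro x hx
    obtain ⟨hx1, hx2⟩ := PySem.List.mem_pyRange_one.mp hx
    simp only [Bool.decide_eq_true]
    exact axis_eq_horizontal G W x hwle' hx1 hx2
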